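-- pv_equiv track=rewrite | github.com/SeongsangCHO/TIL | CS/PS/복습/progr_lv1/모의고사.py | solution
-- ===== SOURCE A (Python) =====
-- def solution(answers):
--     answer = []
--     one = [1,2,3,4,5] # 5
--     two = [2,1,2,3,2,4,2,5] # 8
--     three = [3,3,1,1,2,2,4,4,5,5] # 10
--
--     cnt = [0,0,0]
--     for idx,v in enumerate(answers):
--         if v == one[idx % 5]:
--             cnt[0] += 1
--         if v == two[idx % 8]:
--             cnt[1] += 1
--         if v == three[idx % 10]:
--             cnt[2] += 1
--     max_val = max(cnt)
--     for idx, c in enumerate(cnt):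
--         if max_val == c:
--             answer.append(idx + 1)
--     return answer
-- ===== SOURCE B (Python) =====
-- def solution(answers):
--     # Histogram-then-score: one pass builds a frequency table keyed by
--     # (position mod 40, value); each pattern is then scored from the 40-entry
--     # table alone, without rescanning the answers (40 = lcm(5, 8, 10)).
--     hist = {}
--     for i, a in enumerate(answers):
--         k = (i % 40, a)
--         hist[k] = hist.get(k, 0) + 1
--     patterns = [[1, 2, 3, 4, 5],
--                 [2, 1, 2, 3, 2, 4, 2, 5],
--                 [3, 3, 1, 1, 2, 2, 4, 4, 5, 5]]
--     scores = [sum(hist.get((r, p[r % len(p)]), 0) for r in range(40))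
--               for p in patterns]
--     best = max(scores)
--     return [i + 1 for i, s in enumerate(scores) if s == best]
-- ===== Notes on version B (the rewrite author's own statement) =====
-- stated objective: alternative
-- what changed: Instead of A's interleaved loop keeping three running counters, B builds a frequency histogram keyed by (index mod 40, value) in one pass (40 = lcm of the pattern periods) and then scores each pattern solely from the 40-entry table, never rescanning the answers.
import Mathlib
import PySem

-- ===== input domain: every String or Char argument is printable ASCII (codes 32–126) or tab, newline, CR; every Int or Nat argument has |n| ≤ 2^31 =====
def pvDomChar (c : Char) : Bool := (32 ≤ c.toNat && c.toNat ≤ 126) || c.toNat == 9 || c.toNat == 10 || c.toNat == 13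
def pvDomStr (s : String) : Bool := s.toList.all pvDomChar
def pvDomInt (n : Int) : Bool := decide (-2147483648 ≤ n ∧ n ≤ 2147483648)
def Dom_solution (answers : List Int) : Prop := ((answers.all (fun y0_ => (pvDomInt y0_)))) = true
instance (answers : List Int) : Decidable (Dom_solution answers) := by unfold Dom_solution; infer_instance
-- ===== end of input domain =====

-- B replaces A's interleaved counting loop by a histogram keyed by (index mod 40, value) built in one pass, from which each pattern's score is read off a fixed 40-entry table; objective: alternative, same cost.


-- ===== PORT A =====
-- the interleaved counting loop: for idx,v in enumerate(answers): three independent ifs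
def solLoopA (one two three : List Int) (idx : Nat) (xs : List Int)
    (c0 c1 c2 : Int) : Int × Int × Int :=
  match xs with
  | [] => (c0, c1, c2)
  | v :: t =>
    let c0 := if v = one.getD (idx % 5) 0 then c0 + 1 else c0
    let c1 := if v = two.getD (idx % 8) 0 then c1 + 1 else c1
    let c2 := if v = three.getD (idx % 10) 0 then c2 + 1 else c2
    solLoopA one two three (idx + 1) t c0 c1 c2

-- the answer-collecting loop: for idx,c in enumerate(cnt): if max_val == c: append idx+1
def solCollectA (maxVal : Int) (idx : Nat) (cnt : List Int) : List Int :=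
  match cnt with
  | [] => []
  | c :: t =>
    (if maxVal = c then [(idx : Int) + 1] else []) ++ solCollectA maxVal (idx + 1) t

def solution (answers : List Int) : List Int :=
  let one : List Int := [1, 2, 3, 4, 5]
  let two : List Int := [2, 1, 2, 3, 2, 4, 2, 5]
  let three : List Int := [3, 3, 1, 1, 2, 2, 4, 4, 5, 5]
  let c := solLoopA one two three 0 answers 0 0 0
  let cnt := [c.1, c.2.1, c.2.2]
  let maxVal := (PySem.List.max? cnt (fun x => x)).getD 0
  solCollectA maxVal 0 cnt

-- ===== PORT B =====
-- hist = {}; for i, a in enumerate(answers): k = (i % 40, a); hist[k] = hist.get(k, 0) + 1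
def histB (answers : List Int) : PySem.Dict (Int × Int) Int :=
  (PySem.List.enumerate answers).foldl
    (fun d ia =>
      let k : Int × Int := (PySem.Int.mod ia.1 40, ia.2)
      d.insert k (d.getD k 0 + 1))
    PySem.Dict.empty

-- sum(hist.get((r, p[r % len(p)]), 0) for r in range(40))
def scoreB (hist : PySem.Dict (Int × Int) Int) (p : List Int) : Int :=
  (PySem.List.pyRange 0 40).foldl
    (fun s r => s + hist.getD (r, PySem.List.pyGetD p (PySem.Int.mod r (p.length : Int)) 0) 0)
    0

-- [i + 1 for i, s in enumerate(scores) if s == best]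
def solCollectB (best : Int) (i : Nat) (scores : List Int) : List Int :=
  match scores with
  | [] => []
  | s :: t =>
    (if s = best then [(i : Int) + 1] else []) ++ solCollectB best (i + 1) t

def solution_alt (answers : List Int) : List Int :=
  let hist := histB answers
  let patterns : List (List Int) :=
    [[1, 2, 3, 4, 5], [2, 1, 2, 3, 2, 4, 2, 5], [3, 3, 1, 1, 2, 2, 4, 4, 5, 5]]
  let scores := patterns.map (fun p => scoreB hist p)
  let best := (PySem.List.max? scores (fun x => x)).getD 0
  solCollectB best 0 scores

-- ===== PRECONDITION & SPEC =====
def Spec_solution (answers : List Int) (out : List Int) : Prop := out = solution_alt answers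
instance (answers : List Int) (out : List Int) : Decidable (Spec_solution answers out) := by unfold Spec_solution; infer_instance

-- ===== CLAIM (what is proved, stated in full; the proofs are below) =====
def Claim_equal_solution : Prop := ∀ (answers : List Int), Dom_solution answers → Spec_solution answers (solution answers)

-- ===== LEMMAS AND PROOFS =====

-- proof-side abbreviation: the number of positions i (counting from s) with xs[i] = p[i % len p]
def matchCnt (p : List Int) (s : Nat) (xs : List Int) : Int :=
  match xs with
  | [] => 0
  | a :: t => (if a = p.getD (s % p.length) 0 then 1 else 0) + matchCnt p (s + 1) t

theorem histB_eq_counter (xs : List Int) :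
    histB xs =
      PySem.Dict.counter
        ((PySem.List.enumerate xs).map (fun ia => (PySem.Int.mod ia.1 40, ia.2))) := by
  rw [← PySem.Dict.foldl_insert_getD_add_one_eq_counter, List.foldl_map]
  rfl

theorem sum_if_pair (g : Int → Int) (c1 c2 : Int) (rs : List Int) (hnd : rs.Nodup) :
    (rs.map (fun r => if ((c1, c2) : Int × Int) = (r, g r) then (1 : Int) else 0)).sum
      = if c1 ∈ rs ∧ c2 = g c1 then 1 else 0 := by
  induction rs with
  | nil => simp
  | cons r t ih =>
    obtain ⟨hrt, hnt⟩ := List.nodup_cons.mp hnd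
    simp only [List.map_cons, List.sum_cons, ih hnt]
    by_cases hr : c1 = r
    · subst hr
      have h2 : c1 ∉ t := hrt
      simp [Prod.ext_iff, h2]
    · simp [Prod.ext_iff, List.mem_cons, fun h : c1 = r => hr h]

theorem sum_count_keys (p : List Int) (hpos : 0 < p.length) (hdvd : (p.length : Int) ∣ 40) :
    ∀ (xs : List Int) (s : Nat),
      ((PySem.List.pyRange 0 40).map (fun r =>
          ((((PySem.List.enumerate xs (s : Int)).map
              (fun ia => (PySem.Int.mod ia.1 40, ia.2))).count
            (r, PySem.List.pyGetD p (PySem.Int.mod r (p.length : Int)) 0) : Nat) : Int))).sum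
        = matchCnt p s xs := by
  intro xs
  induction xs with
  | nil => intro s; simp [matchCnt, PySem.List.enumerate_nil]
  | cons a t ih =>
    intro s
    have key40 : (0 : Int) ≤ PySem.Int.mod (s : Int) 40 ∧ PySem.Int.mod (s : Int) 40 < 40 :=
      ⟨PySem.Int.mod_nonneg _ (by norm_num), PySem.Int.mod_lt _ (by norm_num)⟩
    have hLpos : (0 : Int) < (p.length : Int) := by exact_mod_cast hpos
    -- the pattern value looked up at residue (s % 40) is p[s % len p]
    have hkey : PySem.List.pyGetD p (PySem.Int.mod (PySem.Int.mod (s : Int) 40) (p.length : Int)) 0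
        = p.getD (s % p.length) 0 := by
      rw [PySem.Int.mod_eq_emod_of_pos hLpos, PySem.Int.mod_eq_emod_of_pos (by norm_num : (0:Int) < 40),
        Int.emod_emod_of_dvd _ hdvd, ← PySem.Int.mod_eq_emod_of_pos hLpos,
        PySem.Int.mod_natCast, PySem.List.pyGetD_natCast]
    have hsplit :
        (fun r => ((((PySem.List.enumerate (a :: t) (s : Int)).map
              (fun ia => (PySem.Int.mod ia.1 40, ia.2))).count
            (r, PySem.List.pyGetD p (PySem.Int.mod r (p.length : Int)) 0) : Nat) : Int))
        = (fun r => ((((PySem.List.enumerate t ((s : Int) + 1)).map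
              (fun ia => (PySem.Int.mod ia.1 40, ia.2))).count
            (r, PySem.List.pyGetD p (PySem.Int.mod r (p.length : Int)) 0) : Nat) : Int)
          + (if ((PySem.Int.mod (s : Int) 40, a) : Int × Int)
                = (r, PySem.List.pyGetD p (PySem.Int.mod r (p.length : Int)) 0)
              then (1 : Int) else 0)) := by
      funext r
      simp only [PySem.List.enumerate_cons, List.map_cons, List.count_cons]
      push_cast
      congr 1
      simp [beq_iff_eq]
    rw [hsplit, List.sum_map_add,
      sum_if_pair _ _ _ _ (PySem.List.nodup_pyRange_one 0 40)]
    have hmem : PySem.Int.mod (s : Int) 40 ∈ PySem.List.pyRange 0 40 :=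
      PySem.List.mem_pyRange_one.mpr key40
    have hst : ((s : Int) + 1) = ((s + 1 : Nat) : Int) := by push_cast; ring
    rw [hst, ih (s + 1)]
    simp only [matchCnt, hmem, true_and, hkey]
    exact add_comm _ _

theorem scoreB_eq (p : List Int) (hpos : 0 < p.length) (hdvd : (p.length : Int) ∣ 40)
    (xs : List Int) : scoreB (histB xs) p = matchCnt p 0 xs := by
  unfold scoreB
  rw [histB_eq_counter, PySem.List.foldl_add, zero_add]
  have h0 : (PySem.List.enumerate xs) = (PySem.List.enumerate xs ((0 : Nat) : Int)) := by
    norm_num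
  simp only [PySem.Dict.getD_counter, h0]
  exact sum_count_keys p hpos hdvd xs 0

theorem solLoopA_eq_scores (xs : List Int) :
    ∀ (i : Nat) (c0 c1 c2 : Int),
      solLoopA [1,2,3,4,5] [2,1,2,3,2,4,2,5] [3,3,1,1,2,2,4,4,5,5] i xs c0 c1 c2 =
        (c0 + matchCnt [1,2,3,4,5] i xs,
         c1 + matchCnt [2,1,2,3,2,4,2,5] i xs,
         c2 + matchCnt [3,3,1,1,2,2,4,4,5,5] i xs) := by
  induction xs with
  | nil => intro i c0 c1 c2; simp [solLoopA, matchCnt]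
  | cons v t ih =>
    intro i c0 c1 c2
    simp only [solLoopA, ih (i+1), matchCnt]
    norm_num
    split_ifs <;> refine ⟨?_, ?_, ?_⟩ <;> ring

theorem solCollect_eq (m : Int) (l : List Int) :
    ∀ (i : Nat), solCollectA m i l = solCollectB m i l := by
  induction l with
  | nil => intro i; rfl
  | cons c t ih =>
    intro i
    simp only [solCollectA, solCollectB, ih]
    congr 1
    by_cases h : m = c
    · simp [h]
    · rw [if_neg h, if_neg (fun hc => h hc.symm)]

-- ===== VERDICT (by name: the statement is the Claim_ definition above) =====
theorem solution_spec : Claim_equal_solution := by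
  intro answers _
  unfold Spec_solution solution solution_alt
  simp only [List.map, solLoopA_eq_scores answers 0, zero_add,
    scoreB_eq [1,2,3,4,5] (by norm_num) (by norm_num),
    scoreB_eq [2,1,2,3,2,4,2,5] (by norm_num) (by norm_num),
    scoreB_eq [3,3,1,1,2,2,4,4,5,5] (by norm_num) (by norm_num)]
  rw [solCollect_eq]
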